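-- pv_equiv track=rewrite | github.com/whytheheckme/FGCteamfiller | app.py | _highest_placeholder_index
-- ===== SOURCE A (Python) =====
-- from typing import Any, Callable, Dict, Iterable, List, Mapping, Optional, Sequence, Set, Tuple
--
-- def _highest_placeholder_index(existing_codes: Set[str], prefix: str) -> Optional[int]:
--     """Return the highest placeholder index encountered for *prefix*, if any."""
--
--     highest: Optional[int] = None
--     for code in existing_codes:
--         if len(code) != 3 or not code.startswith(prefix):
--             continue
--
--         suffix = code[1:]
--         if not suffix.isalpha():
--             continue
--
--         index = (ord(suffix[0]) - 65) * 26 + (ord(suffix[1]) - 65)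
--         if highest is None or index > highest:
--             highest = index
--
--     return highest
-- ===== SOURCE B (Python) =====
-- def _highest_placeholder_index(existing_codes, prefix):
--     """Stage 1: keep the qualifying codes.  Stage 2: sort them descending by
--     their placeholder index and convert the front element of the sorted list."""
--     candidates = [c for c in existing_codes
--                   if len(c) == 3 and c.startswith(prefix) and c[1:].isalpha()]
--     if not candidates:
--         return None
--     best = sorted(candidates,
--                   key=lambda c: (ord(c[1]) - 65) * 26 + (ord(c[2]) - 65),
--                   reverse=True)[0]
--     return (ord(best[1]) - 65) * 26 + (ord(best[2]) - 65)
-- ===== Notes on version B (the rewrite author's own statement) =====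
-- stated objective: alternative
-- what changed: Replaces A's single pass with an Optional running maximum by two stages: filter the qualifying codes, sort them descending by placeholder index, and convert only the front element of the sorted list.
import Mathlib
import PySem

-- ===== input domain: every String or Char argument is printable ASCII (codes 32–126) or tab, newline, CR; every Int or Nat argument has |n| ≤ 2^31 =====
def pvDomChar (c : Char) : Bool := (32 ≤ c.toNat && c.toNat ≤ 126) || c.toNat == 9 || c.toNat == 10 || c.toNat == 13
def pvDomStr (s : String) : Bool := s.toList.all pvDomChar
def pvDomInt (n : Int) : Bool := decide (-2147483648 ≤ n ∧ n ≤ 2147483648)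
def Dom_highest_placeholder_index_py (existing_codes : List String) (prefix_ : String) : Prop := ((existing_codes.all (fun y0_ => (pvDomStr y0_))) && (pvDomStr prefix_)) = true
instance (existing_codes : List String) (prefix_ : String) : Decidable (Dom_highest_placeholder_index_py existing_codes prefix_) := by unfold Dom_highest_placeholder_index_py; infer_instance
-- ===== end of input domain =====

-- B replaces A's running-max loop by filter + descending sort + head (alternative
-- decomposition; the return value is proved identical, same asymptotics not claimed).


-- ===== PORT A =====
-- one iteration of A's loop body (the two 'continue' guards, then the running-max update)
def hpiStepA (prefix_ : String) (highest : Option Int) (code : String) : Option Int :=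
  if PySem.Str.len code ≠ 3 ∨ ¬ PySem.Str.startswith code prefix_ then highest
  else
    let suffix := PySem.Chars.slice code.toList (some 1) none   -- code[1:]
    if ¬ PySem.Chars.strIsalpha suffix then highest
    else
      -- suffix[0], suffix[1]: in range because len(code) == 3 (guard above); exact there
      match suffix with
      | c1 :: c2 :: _ =>
        let index : Int := ((c1.toNat : Int) - 65) * 26 + ((c2.toNat : Int) - 65)
        match highest with
        | none => some index
        | some h => if index > h then some index else some h
      | _ => highest   -- unreachable: the length-3 guard makes suffix two chars

def highest_placeholder_index_py (existing_codes : List String) (prefix_ : String) : Option Int :=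
  existing_codes.foldl (hpiStepA prefix_) none

-- ===== PORT B =====
-- the filter of B's first stage
def hpiKeep (prefix_ : String) (c : String) : Bool :=
  PySem.Str.len c == 3 && PySem.Str.startswith c prefix_ &&
    PySem.Chars.strIsalpha (PySem.Chars.slice c.toList (some 1) none)

-- B's sort key / final conversion: (ord(c[1]) - 65) * 26 + (ord(c[2]) - 65)
def hpiIndex (c : String) : Int :=
  -- c[1], c[2]: in range because the filter requires len(c) == 3; exact there
  (((c.toList.getD 1 'A').toNat : Int) - 65) * 26 + (((c.toList.getD 2 'A').toNat : Int) - 65)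

def highest_placeholder_index_py_alt (existing_codes : List String) (prefix_ : String) : Option Int :=
  let candidates := existing_codes.filter (hpiKeep prefix_)
  if candidates = [] then none
  else
    match PySem.List.sorted candidates hpiIndex true with   -- sorted(..., reverse=True)
    | best :: _ => some (hpiIndex best)
    | [] => none   -- unreachable: candidates is nonempty, sorted is a permutation

-- ===== PRECONDITION & SPEC =====
def Spec_highest_placeholder_index_py (existing_codes : List String) (prefix_ : String) (out : Option Int) : Prop := out = highest_placeholder_index_py_alt existing_codes prefix_
instance (existing_codes : List String) (prefix_ : String) (out : Option Int) : Decidable (Spec_highest_placeholder_index_py existing_codes prefix_ out) := by unfold Spec_highest_placeholder_index_py; infer_instance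

-- ===== CLAIM (what is proved, stated in full; the proofs are below) =====
def Claim_equal_highest_placeholder_index_py : Prop := ∀ (existing_codes : List String) (prefix_ : String), Dom_highest_placeholder_index_py existing_codes prefix_ → Spec_highest_placeholder_index_py existing_codes prefix_ (highest_placeholder_index_py existing_codes prefix_)

-- ===== LEMMAS AND PROOFS =====

-- A's step is: update the running max with hpiIndex when the code passes B's filter
lemma hpiStepA_eq (prefix_ : String) (acc : Option Int) (code : String) :
    hpiStepA prefix_ acc code =
      if hpiKeep prefix_ code then
        (match acc with
         | none => some (hpiIndex code)
         | some h => if hpiIndex code > h then some (hpiIndex code) else some h)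
      else acc := by
  unfold hpiStepA hpiKeep hpiIndex
  simp only [PySem.Str.len_eq, PySem.Str.startswith_eq, PySem.Chars.slice_eq_listSlice]
  by_cases hlen : code.toList.length = 3
  · obtain ⟨a, b, c, hc⟩ : ∃ a b c, code.toList = [a, b, c] := by
      rcases hL : code.toList with _ | ⟨a, _ | ⟨b, _ | ⟨c, _ | ⟨d, t⟩⟩⟩⟩ <;> simp_all
    simp only [hc]
    by_cases hsw : PySem.Chars.startswith [a, b, c] prefix_.toList
    · by_cases hal : PySem.Chars.strIsalpha [b, c]
      · simp [hsw, hal, PySem.List.slice_from_one]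
      · simp [hsw, hal, PySem.List.slice_from_one]
    · simp [hsw]
  · have hlen' : ¬ code.length = 3 := by
      simpa [← String.length_toList] using hlen
    have h3 : ¬((code.length : Int) = 3) := by exact_mod_cast hlen'
    simp [h3]

-- folding the running-max update from 'some a' computes a plain foldl max
lemma foldl_optmax_some (f : String → Int) (l : List String) (a : Int) :
    l.foldl (fun acc c =>
      match acc with
      | none => some (f c)
      | some h => if f c > h then some (f c) else some h) (some a)
    = some (l.foldl (fun m c => max m (f c)) a) := by
  induction l generalizing a with
  | nil => rfl
  | cons x t ih =>
    simp only [List.foldl_cons]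
    have : (if f x > a then some (f x) else some a) = some (max a (f x)) := by
      by_cases h : f x > a <;> simp [h, max_def] <;> omega
    rw [this, ih]

-- a running max of a projection stays below any common upper bound
lemma foldl_maxproj_le (f : String → Int) (t : List String) (a b : Int)
    (ha : a ≤ b) (h : ∀ y ∈ t, f y ≤ b) :
    t.foldl (fun m c => max m (f c)) a ≤ b := by
  induction t generalizing a with
  | nil => exact ha
  | cons x r ih =>
    simp only [List.foldl_cons]
    exact ih (max a (f x)) (max_le ha (h x (by simp)))
      (fun y hy => h y (by simp [hy]))

-- ===== VERDICT (by name: the statement is the Claim_ definition above) =====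
theorem highest_placeholder_index_py_spec : Claim_equal_highest_placeholder_index_py := by
  intro existing_codes prefix_ _
  unfold Spec_highest_placeholder_index_py highest_placeholder_index_py highest_placeholder_index_py_alt
  have h1 : existing_codes.foldl (hpiStepA prefix_) none
      = existing_codes.foldl (fun acc c =>
          if hpiKeep prefix_ c then
            (match acc with
             | none => some (hpiIndex c)
             | some h => if hpiIndex c > h then some (hpiIndex c) else some h)
          else acc) none :=
    PySem.List.foldl_congr_mem existing_codes (hpiStepA prefix_)
      (fun acc c => if hpiKeep prefix_ c then
          (match acc with
           | none => some (hpiIndex c)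
           | some h => if hpiIndex c > h then some (hpiIndex c) else some h)
        else acc) none
      (fun acc c _ => hpiStepA_eq prefix_ acc c)
  rw [h1, PySem.List.foldl_if_eq_foldl_filter]
  rcases hc : existing_codes.filter (hpiKeep prefix_) with _ | ⟨x, t⟩
  · simp
  · simp only [List.foldl_cons, if_neg (by simp : ¬ x :: t = [])]
    rw [foldl_optmax_some]
    rcases hs : PySem.List.sorted (x :: t) hpiIndex true with _ | ⟨best, rest⟩
    · exact absurd ((PySem.List.sorted_eq_nil_iff _ _ _).1 hs) (by simp)
    · have hub : ∀ y ∈ x :: t, hpiIndex y ≤ hpiIndex best :=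
        PySem.List.key_head_sorted_rev_ge (x :: t) hpiIndex hs
      have hmem : best ∈ x :: t := by
        have := (PySem.List.sorted_perm (x :: t) hpiIndex true).mem_iff (a := best)
        exact this.1 (by simp [hs])
      have hle : t.foldl (fun m c => max m (hpiIndex c)) (hpiIndex x) ≤ hpiIndex best :=
        foldl_maxproj_le hpiIndex t _ _ (hub x (by simp))
          (fun y hy => hub y (by simp [hy]))
      have hge : hpiIndex best ≤ t.foldl (fun m c => max m (hpiIndex c)) (hpiIndex x) := by
        rcases PySem.List.le_foldl_max_int t hpiIndex (hpiIndex x) with ⟨hinit, hall⟩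
        rcases List.mem_cons.1 hmem with h | h
        · exact h ▸ hinit
        · exact hall best h
      simp [le_antisymm hle hge]
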